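-- pv_equiv track=rewrite | github.com/ephrata1888/automation-auditor | src/tools/doc_tools.py | find_keyword_chunks
-- ===== SOURCE A (Python) =====
-- from typing import List
--
-- def find_keyword_chunks(chunks: List[str], keywords: List[str]) -> List[str]:
--     """Return all chunks that contain any of the given keywords.
--
--     Matching is done in a case-insensitive manner.
--
--     Args:
--         chunks: List of text chunks.
--         keywords: Keywords to search for.
--
--     Returns:
--         A list of chunks that contain at least one of the keywords.
--     """
--     if not chunks or not keywords:
--         return []
--
--     lowered_keywords = [kw.lower() for kw in keywords if kw]
--     if not lowered_keywords:
--         return []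
--
--     matched: List[str] = []
--     for chunk in chunks:
--         lowered_chunk = chunk.lower()
--         if any(kw in lowered_chunk for kw in lowered_keywords):
--             matched.append(chunk)
--
--     return matched
-- ===== SOURCE B (Python) =====
-- from typing import List
--
-- def find_keyword_chunks(chunks: List[str], keywords: List[str]) -> List[str]:
--     """Return all chunks containing any keyword (case-insensitive).
--
--     Set-based strategy: hash the lowered keywords once, then scan each chunk
--     and test its substrings (up to the longest keyword length) for membership,
--     making the per-chunk work independent of the number of keywords.
--     """
--     pset = {kw.lower() for kw in keywords if kw}
--     if not pset:
--         return []
--     maxlen = max(map(len, pset))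
--     matched: List[str] = []
--     for chunk in chunks:
--         low = chunk.lower()
--         if any(low[i:i + m] in pset
--                for i in range(len(low)) for m in range(1, maxlen + 1)):
--             matched.append(chunk)
--     return matched
-- ===== Notes on version B (the rewrite author's own statement) =====
-- stated objective: faster
-- what changed: B builds a hash set of the lowered keywords once and tests each chunk's substrings (bounded by the longest keyword length) for set membership, instead of A's one full substring search per keyword per chunk; the per-chunk cost no longer depends on the number of keywords.
import Mathlib
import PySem

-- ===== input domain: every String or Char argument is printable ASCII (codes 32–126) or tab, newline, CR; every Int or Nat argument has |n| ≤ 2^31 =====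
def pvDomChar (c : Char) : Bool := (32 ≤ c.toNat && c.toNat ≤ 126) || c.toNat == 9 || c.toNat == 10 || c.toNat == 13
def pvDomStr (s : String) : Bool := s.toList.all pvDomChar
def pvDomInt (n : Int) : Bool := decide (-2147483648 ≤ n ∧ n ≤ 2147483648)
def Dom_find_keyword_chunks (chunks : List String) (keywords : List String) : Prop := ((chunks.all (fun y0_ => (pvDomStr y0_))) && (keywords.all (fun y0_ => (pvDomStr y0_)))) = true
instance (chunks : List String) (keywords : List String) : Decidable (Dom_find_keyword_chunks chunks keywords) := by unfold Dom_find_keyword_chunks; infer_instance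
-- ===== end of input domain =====

-- B hashes the lowered keywords into a set once and tests each chunk's substrings
-- (bounded by the longest keyword length) for membership, instead of A's one substring
-- search per keyword per chunk; objective: faster (per-chunk work independent of the
-- number of keywords).

-- ===== PORT A =====
def find_keyword_chunks (chunks : List String) (keywords : List String) : List String :=
  if chunks = [] ∨ keywords = [] then []
  else
    let lowered := (keywords.filter (fun kw => !(kw == ""))).map PySem.Str.lower
    if lowered = [] then []
    else
      chunks.foldl (fun matched chunk =>
        let lowered_chunk := PySem.Str.lower chunk
        if lowered.any (fun kw => PySem.Str.isIn kw lowered_chunk) then matched ++ [chunk]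
        else matched) []

-- ===== PORT B =====
def find_keyword_chunks_alt (chunks : List String) (keywords : List String) : List String :=
  let pset := PySem.Set.ofList ((keywords.filter (fun kw => !(kw == ""))).map PySem.Str.lower)
  if pset = [] then []
  else
    let maxlen : Int := (PySem.List.max? (pset.map PySem.Str.len) (fun y => y)).getD 0
    chunks.foldl (fun matched chunk =>
      let low := PySem.Str.lower chunk
      if (PySem.List.pyRange 0 (PySem.Str.len low) 1).any (fun i =>
           (PySem.List.pyRange 1 (maxlen + 1) 1).any (fun m =>
             PySem.Set.contains pset (PySem.Str.slice low (some i) (some (i + m)))))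
      then matched ++ [chunk] else matched) []

-- ===== PRECONDITION & SPEC =====
def Spec_find_keyword_chunks (chunks : List String) (keywords : List String) (out : List String) : Prop := out = find_keyword_chunks_alt chunks keywords
instance (chunks : List String) (keywords : List String) (out : List String) : Decidable (Spec_find_keyword_chunks chunks keywords out) := by unfold Spec_find_keyword_chunks; infer_instance

-- ===== CLAIM (what is proved, stated in full; the proofs are below) =====
def Claim_equal_find_keyword_chunks : Prop := ∀ (chunks : List String) (keywords : List String), Dom_find_keyword_chunks chunks keywords → Spec_find_keyword_chunks chunks keywords (find_keyword_chunks chunks keywords)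

-- ===== LEMMAS AND PROOFS =====

-- per chunk: 'some keyword occurs in low' iff 'some substring of low (of length
-- 1..maxlen) is a keyword', provided keywords are nonempty and no longer than maxlen
lemma point_eq (lowered : List String) (hne : ∀ kw ∈ lowered, kw.toList ≠ [])
    (maxlen : Int) (hmax : ∀ kw ∈ lowered, PySem.Str.len kw ≤ maxlen) (low : String) :
    lowered.any (fun kw => PySem.Str.isIn kw low)
      = (PySem.List.pyRange 0 (PySem.Str.len low) 1).any (fun i =>
          (PySem.List.pyRange 1 (maxlen + 1) 1).any (fun m =>
            PySem.Set.contains (PySem.Set.ofList lowered)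
              (PySem.Str.slice low (some i) (some (i + m))))) := by
  rw [Bool.eq_iff_iff]
  simp only [List.any_eq_true]
  constructor
  · rintro ⟨kw, hkw, hin⟩
    have hinf : kw.toList <:+: low.toList := (PySem.Str.isIn_iff_infix _ _).mp hin
    obtain ⟨t, u, hsplit⟩ := hinf
    -- kw occurs at position t.length
    have hpre : kw.toList <+: low.toList.drop t.length := by
      rw [← hsplit]
      simp [List.prefix_append]
    have hklen : 1 ≤ kw.toList.length := by
      cases h : kw.toList with
      | nil => exact absurd h (hne kw hkw)
      | cons a l => simp
    have hit : t.length < low.toList.length := by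
      have h1 : kw.toList.length ≤ (low.toList.drop t.length).length :=
        hpre.length_le
      simp only [List.length_drop] at h1
      omega
    refine ⟨(t.length : Int), ?_, (kw.toList.length : Int), ?_, ?_⟩
    · rw [PySem.List.mem_pyRange_one]
      constructor
      · exact_mod_cast Int.natCast_nonneg _
      · rw [PySem.Str.len_eq]
        exact_mod_cast hit
    · rw [PySem.List.mem_pyRange_one]
      constructor
      · exact_mod_cast hklen
      · have := hmax kw hkw
        rw [PySem.Str.len_eq] at this
        omega
    · rw [PySem.Set.contains_iff, PySem.Set.mem_ofList]
      have hs : (PySem.Str.slice low (some (t.length : Int))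
          (some ((t.length : Int) + (kw.toList.length : Int)))).toList
          = (low.toList.drop t.length).take kw.toList.length := by
        rw [PySem.Str.toList_slice]
        exact PySem.List.slice_natCast_add ..
      have hkweq : (low.toList.drop t.length).take kw.toList.length = kw.toList :=
        (List.prefix_iff_eq_take.mp hpre).symm
      have : (PySem.Str.slice low (some (t.length : Int))
          (some ((t.length : Int) + (kw.toList.length : Int)))).toList = kw.toList := by
        rw [hs, hkweq]
      have heq : PySem.Str.slice low (some (t.length : Int))
          (some ((t.length : Int) + (kw.toList.length : Int))) = kw :=
        String.toList_inj.mp this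
      rw [heq]
      exact hkw
  · rintro ⟨i, hi, m, hm, hc⟩
    rw [PySem.List.mem_pyRange_one] at hi hm
    rw [PySem.Set.contains_iff, PySem.Set.mem_ofList] at hc
    refine ⟨_, hc, ?_⟩
    rw [PySem.Str.isIn_iff_infix, PySem.Str.toList_slice]
    rw [show PySem.Chars.slice low.toList (some i) (some (i + m))
        = List.take ((i + m).toNat - i.toNat) (List.drop i.toNat low.toList) from
      PySem.List.slice_toNat low.toList hi.1 (by omega)]
    calc List.take ((i + m).toNat - i.toNat) (List.drop i.toNat low.toList)
        <:+: low.toList.drop i.toNat := (List.take_prefix _ _).isInfix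
    _ <:+: low.toList := (List.drop_suffix _ _).isInfix

theorem find_keyword_chunks_spec : Claim_equal_find_keyword_chunks := by
  intro chunks keywords _
  unfold Spec_find_keyword_chunks find_keyword_chunks find_keyword_chunks_alt
  dsimp only
  set lowered := (keywords.filter (fun kw => !(kw == ""))).map PySem.Str.lower with hlow
  by_cases hnil : lowered = []
  · -- no usable keyword: both sides return []
    rw [hnil]
    by_cases hck : chunks = [] ∨ keywords = []
    · rw [if_pos hck]; simp
    · rw [if_neg hck, if_pos rfl]; simp
  · have hpne : PySem.Set.ofList lowered ≠ [] := by
      intro h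
      rcases List.exists_mem_of_ne_nil _ hnil with ⟨x, hx⟩
      have := (PySem.Set.mem_ofList lowered x).mpr hx
      simp [h] at this
    have hck : ¬(chunks = [] ∨ keywords = []) ∨ chunks = [] := by
      by_cases hc : chunks = []
      · right; exact hc
      · left
        rintro (h | h)
        · exact hc h
        · apply hnil; rw [hlow, h]; rfl
    rcases hck with hck | hck
    · rw [if_neg hck, if_neg hnil, if_neg hpne]
      rw [PySem.List.foldl_append_if_eq_filter, PySem.List.foldl_append_if_eq_filter]
      simp only [List.nil_append]
      apply List.filter_congr
      intro chunk _
      -- hypotheses of the pointwise lemma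
      have hne : ∀ kw ∈ lowered, kw.toList ≠ [] := by
        intro kw hkw
        rw [hlow] at hkw
        obtain ⟨k, hk, rfl⟩ := List.mem_map.mp hkw
        have hk' : k ≠ "" := by simpa using (List.of_mem_filter hk)
        simp only [PySem.Str.toList_lower, PySem.Chars.lower, ne_eq, List.map_eq_nil_iff]
        intro h
        exact hk' (String.toList_inj.mp (by simp [h]))
      obtain ⟨M, hM⟩ : ∃ M, PySem.List.max? (((PySem.Set.ofList lowered)).map PySem.Str.len)
          (fun y => y) = some M := by
        cases h : PySem.List.max? (((PySem.Set.ofList lowered)).map PySem.Str.len)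
            (fun y => y) with
        | none =>
          exfalso
          apply hpne
          have := (PySem.List.max?_eq_none_iff _ _).mp h
          simpa using this
        | some M => exact ⟨M, rfl⟩
      have hmax : ∀ kw ∈ lowered, PySem.Str.len kw ≤ (PySem.List.max?
          (((PySem.Set.ofList lowered)).map PySem.Str.len) (fun y => y)).getD 0 := by
        intro kw hkw
        rw [hM]
        exact PySem.List.max?_isMax hM (PySem.Str.len kw)
          (List.mem_map.mpr ⟨kw, (PySem.Set.mem_ofList lowered kw).mpr hkw, rfl⟩)
      rw [point_eq lowered hne _ hmax (PySem.Str.lower chunk)]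
    · subst hck
      simp [hpne]
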